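-- pv_equiv track=rewrite | github.com/Sadmin23/Crypto-Lab | Lab 1/problem2.py | mergeDecryptedChunks
-- ===== SOURCE A (Python) =====
-- def mergeDecryptedChunks(decrypted_chunks):
--     merged_text = ""
--
--     max_length = max(len(chunk) for chunk in decrypted_chunks)
--
--     for i in range(max_length):
--         for chunk in decrypted_chunks:
--             if i < len(chunk):
--                 merged_text += chunk[i]
--
--     return merged_text
-- ===== SOURCE B (Python) =====
-- def mergeDecryptedChunks(decrypted_chunks):
--     pieces = []
--     active = [c for c in decrypted_chunks if c]
--     while active:
--         pieces.append(''.join(c[0] for c in active))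
--         active = [c[1:] for c in active if len(c) > 1]
--     return ''.join(pieces)
-- ===== Notes on version B (the rewrite author's own statement) =====
-- stated objective: alternative
-- what changed: Replaces A's index-driven double loop (for every column, scan ALL chunks and test i < len) by a peeling transpose: keep only still-active chunks, emit their first characters, advance to their tails, so exhausted chunks are dropped instead of re-scanned, and build the result with join instead of repeated string +=.
import Mathlib
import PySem

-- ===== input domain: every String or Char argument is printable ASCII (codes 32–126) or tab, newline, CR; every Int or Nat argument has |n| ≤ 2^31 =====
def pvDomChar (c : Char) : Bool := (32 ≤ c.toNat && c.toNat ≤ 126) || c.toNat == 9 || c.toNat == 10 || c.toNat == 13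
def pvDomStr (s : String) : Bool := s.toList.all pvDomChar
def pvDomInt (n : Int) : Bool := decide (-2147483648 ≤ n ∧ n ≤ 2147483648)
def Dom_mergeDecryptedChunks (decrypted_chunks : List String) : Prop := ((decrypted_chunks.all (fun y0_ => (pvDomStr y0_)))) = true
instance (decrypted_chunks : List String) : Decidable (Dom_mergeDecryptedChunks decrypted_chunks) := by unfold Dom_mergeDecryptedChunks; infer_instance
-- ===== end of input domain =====

-- B replaces A's column-index double loop by a "peel the heads" transpose over the still-active
-- chunks (exhausted chunks are dropped instead of re-scanned each column); same return value on
-- every input A returns on (Pre_ excludes only [], where A's max() raises ValueError).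

-- ===== PORT A =====
-- merged_text is accumulated as a List Char (Python string concatenation, exact on code points).
def mergeDecryptedChunks (decrypted_chunks : List String) : String :=
  let max_length : Int :=
    (PySem.List.max? (decrypted_chunks.map (fun chunk => (chunk.toList.length : Int)))
      (fun x => x)).getD 0   -- getD 0 unreachable under Pre_: max() raises on an empty sequence
  let merged_text : List Char :=
    (PySem.List.pyRange 0 max_length 1).foldl (fun acc i =>
      decrypted_chunks.foldl (fun acc chunk =>
        if i < (chunk.toList.length : Int) then
          acc ++ [PySem.List.pyGetD chunk.toList i ' ']   -- chunk[i], in range under the guard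
        else acc) acc) []
  String.mk merged_text

-- ===== PORT B =====
-- active = [c[1:] for c in active if len(c) > 1]
def altStep (active : List (List Char)) : List (List Char) :=
  (active.filter (fun c => decide (1 < c.length))).map List.tail

-- the while loop; fuel only makes the recursion structural (it is chosen large enough below)
def altGo : Nat → List (List Char) → List Char
  | 0, _ => []
  | fuel + 1, active =>
    if active = [] then []
    else (active.map (fun c => c.headD ' ')) ++ altGo fuel (altStep active)

def mergeDecryptedChunks_alt (decrypted_chunks : List String) : String :=
  let active := (decrypted_chunks.map String.toList).filter (fun c => decide (c ≠ []))
  String.mk (altGo ((active.map List.length).sum + active.length + 1) active)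

-- ===== PRECONDITION & SPEC =====
-- Pre_ excludes only the empty list, on which Python's max() raises ValueError.
def Pre_mergeDecryptedChunks (decrypted_chunks : List String) : Prop := decrypted_chunks ≠ []
instance (decrypted_chunks : List String) : Decidable (Pre_mergeDecryptedChunks decrypted_chunks) := by unfold Pre_mergeDecryptedChunks; infer_instance
def pvWitness_mergeDecryptedChunks : List String := ["ab", "c"]

def Spec_mergeDecryptedChunks (decrypted_chunks : List String) (out : String) : Prop := out = mergeDecryptedChunks_alt decrypted_chunks
instance (decrypted_chunks : List String) (out : String) : Decidable (Spec_mergeDecryptedChunks decrypted_chunks out) := by unfold Spec_mergeDecryptedChunks; infer_instance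

-- ===== CLAIM (what is proved, stated in full; the proofs are below) =====
def Claim_equal_mergeDecryptedChunks : Prop := ∀ (decrypted_chunks : List String), Dom_mergeDecryptedChunks decrypted_chunks → Pre_mergeDecryptedChunks decrypted_chunks → Spec_mergeDecryptedChunks decrypted_chunks (mergeDecryptedChunks decrypted_chunks)

-- ===== LEMMAS AND PROOFS =====

theorem altStep_sum_le (l : List (List Char)) :
    ((altStep l).map List.length).sum + (altStep l).length ≤ (l.map List.length).sum := by
  induction l with
  | nil => simp [altStep]
  | cons x t ih =>
    by_cases h : 1 < x.length
    · rw [show altStep (x :: t) = x.tail :: altStep t from by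
        simp [altStep, List.filter_cons, h]]
      simp only [List.map_cons, List.sum_cons, List.length_cons]
      have hx : x.tail.length + 1 = x.length := by
        simp [List.length_tail]; omega
      omega
    · rw [show altStep (x :: t) = altStep t from by
        simp [altStep, List.filter_cons, h]]
      simp only [List.map_cons, List.sum_cons]
      omega

-- column k of a list of rows: the k-th character of every row long enough, in row order
def col (k : Nat) (L : List (List Char)) : List Char := L.filterMap (fun r => r[k]?)

theorem col_shift (k : Nat) (L : List (List Char)) : col k (altStep L) = col (k + 1) L := by
  induction L with
  | nil => rfl
  | cons r t ih =>
    by_cases h : 1 < r.length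
    · have h1 : altStep (r :: t) = r.tail :: altStep t := by
        simp [altStep, List.filter_cons, h]
      simp only [col] at ih ⊢
      rw [h1]
      cases hck : r[k + 1]? <;>
        simp [List.filterMap_cons, List.getElem?_tail, hck, ih]
    · have h1 : altStep (r :: t) = altStep t := by
        simp [altStep, List.filter_cons, h]
      have hr : r[k + 1]? = none := List.getElem?_eq_none (by omega)
      simp only [col] at ih ⊢
      rw [h1]
      simp [List.filterMap_cons, hr, ih]

theorem col_filter (k : Nat) (L : List (List Char)) :
    col k (L.filter (fun r => decide (r ≠ []))) = col k L := by
  induction L with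
  | nil => rfl
  | cons r t ih =>
    by_cases h : r = []
    · subst h
      simpa [col, List.filter_cons] using ih
    · have h1 : (r :: t).filter (fun r => decide (r ≠ [])) =
          r :: t.filter (fun r => decide (r ≠ [])) := by
        simp [List.filter_cons, h]
      simp only [col] at ih ⊢
      rw [h1]
      cases hck : r[k]? <;> simp only [List.filterMap_cons, hck] <;>
        simpa using ih

theorem col_zero (L : List (List Char)) (h : ∀ r ∈ L, r ≠ []) :
    L.map (fun r => r.headD ' ') = col 0 L := by
  induction L with
  | nil => rfl
  | cons r t ih =>
    have hr : r ≠ [] := h r (by simp)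
    have htail := ih (fun x hx => h x (List.mem_cons_of_mem _ hx))
    cases r with
    | nil => exact absurd rfl hr
    | cons a s =>
      have hcol : col 0 ((a :: s) :: t) = a :: col 0 t := by
        simp [col]
      rw [List.map_cons, hcol, ← htail]
      rfl

theorem altGo_eq (K : Nat) (L : List (List Char)) (fuel : Nat)
    (hne : ∀ r ∈ L, r ≠ []) (hle : ∀ r ∈ L, r.length ≤ K)
    (hfuel : (L.map List.length).sum + L.length < fuel) :
    altGo fuel L = (List.range K).flatMap (fun k => col k L) := by
  induction K generalizing L fuel with
  | zero =>
    have hL : L = [] := by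
      cases L with
      | nil => rfl
      | cons r t =>
        have h1 := hne r (by simp)
        have h2 := hle r (by simp)
        cases r with
        | nil => exact absurd rfl h1
        | cons a s => simp at h2
    subst hL
    cases fuel with
    | zero => simp at hfuel
    | succ f => simp [altGo]
  | succ K ih =>
    cases fuel with
    | zero => omega
    | succ f =>
      by_cases hL : L = []
      · subst hL; simp [altGo, col]
      · rw [altGo]
        simp only [hL, if_false]
        have hne' : ∀ r ∈ altStep L, r ≠ [] := by
          intro r hr
          simp only [altStep, List.mem_map, List.mem_filter] at hr
          obtain ⟨d, ⟨_, hd⟩, rfl⟩ := hr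
          have hd' : 1 < d.length := by simpa using hd
          intro hteq
          have := congrArg List.length hteq
          simp [List.length_tail] at this
          omega
        have hle' : ∀ r ∈ altStep L, r.length ≤ K := by
          intro r hr
          simp only [altStep, List.mem_map, List.mem_filter] at hr
          obtain ⟨d, ⟨hdL, _⟩, rfl⟩ := hr
          have := hle d hdL
          simp [List.length_tail]; omega
        have hfuel' : ((altStep L).map List.length).sum + (altStep L).length < f := by
          have h1 := altStep_sum_le L
          have h2 : 0 < L.length := List.length_pos_of_ne_nil hL
          omega
        rw [ih (altStep L) f hne' hle' hfuel']
        rw [List.range_succ_eq_map, List.flatMap_cons, List.flatMap_map, col_zero L hne]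
        congr 1
        exact congrArg (fun f => List.flatMap f (List.range K))
          (funext fun k => col_shift k L)

-- the body of A's inner loop over one column, as a column of the rows
theorem filter_map_eq_col (k : Nat) (cs : List String) :
    (cs.filter (fun s => decide ((k : Int) < (s.toList.length : Int)))).map
        (fun s => s.toList.getD k ' ')
      = col k (cs.map String.toList) := by
  induction cs with
  | nil => rfl
  | cons s t ih =>
    by_cases hnat : k < s.toList.length
    · have h : ((k : Int) < (s.toList.length : Int)) := by exact_mod_cast hnat
      have h1 : (s :: t).filter (fun s => decide ((k : Int) < (s.toList.length : Int)))
          = s :: t.filter (fun s => decide ((k : Int) < (s.toList.length : Int))) := by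
        simp only [List.filter_cons, if_pos (decide_eq_true h)]
      have hsome : s.toList[k]? = some s.toList[k] := List.getElem?_eq_getElem hnat
      have hcol : col k (s.toList :: t.map String.toList)
          = s.toList[k] :: col k (t.map String.toList) := by
        simp [col, hsome]
      rw [h1, List.map_cons, List.map_cons, hcol, ih]
      congr 1
      simp [List.getD_eq_getElem?_getD, hsome]
    · have h : ¬ ((k : Int) < (s.toList.length : Int)) := by exact_mod_cast hnat
      have h1 : (s :: t).filter (fun s => decide ((k : Int) < (s.toList.length : Int)))
          = t.filter (fun s => decide ((k : Int) < (s.toList.length : Int))) := by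
        simp only [List.filter_cons, decide_eq_false h, Bool.false_eq_true, if_false]
      have hnone : s.toList[k]? = none := List.getElem?_eq_none (by omega)
      have hcol : col k (s.toList :: t.map String.toList) = col k (t.map String.toList) := by
        simp [col, hnone]
      rw [h1, List.map_cons, hcol, ih]

-- ===== VERDICT (by name: the statement is the Claim_ definition above) =====
theorem mergeDecryptedChunks_spec : Claim_equal_mergeDecryptedChunks := by
  intro cs _ hpre
  unfold Spec_mergeDecryptedChunks
  unfold Pre_mergeDecryptedChunks at hpre
  unfold mergeDecryptedChunks mergeDecryptedChunks_alt
  rcases hmo : PySem.List.max? (cs.map (fun s => (s.toList.length : Int))) (fun x => x)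
      with _ | m
  · rw [PySem.List.max?_eq_none_iff] at hmo
    simp at hmo
    exact absurd hmo hpre
  · have hmax := PySem.List.max?_isMax hmo
    have hmem := PySem.List.max?_mem hmo
    have hm0 : 0 ≤ m := by
      obtain ⟨c0, _, hc0⟩ := List.mem_map.mp hmem
      rw [← hc0]; positivity
    simp only [hmo, Option.getD_some]
    simp only [PySem.List.foldl_append_ite]
    rw [PySem.List.foldl_append_eq_flatMap, List.nil_append]
    rw [PySem.List.pyRange_one, List.flatMap_map]
    simp only [Int.sub_zero, zero_add, PySem.List.pyGetD_natCast]
    set L0 := (cs.map String.toList).filter (fun r => decide (r ≠ [])) with hL0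
    have hne : ∀ r ∈ L0, r ≠ [] := by
      intro r hr
      have := List.of_mem_filter hr
      simpa using this
    have hle : ∀ r ∈ L0, r.length ≤ m.toNat := by
      intro r hr
      have hr' : r ∈ cs.map String.toList := List.mem_of_mem_filter hr
      obtain ⟨d, hd, rfl⟩ := List.mem_map.mp hr'
      have : ((d.toList.length : Int)) ≤ m :=
        hmax _ (List.mem_map.mpr ⟨d, hd, rfl⟩)
      omega
    rw [altGo_eq m.toNat L0 ((L0.map List.length).sum + L0.length + 1) hne hle (by omega)]
    congr 1
    have hfun : ∀ k : Nat,
        (cs.filter (fun x => decide ((k : Int) < (x.toList.length : Int)))).map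
            (fun x => x.toList.getD k ' ')
          = col k L0 := by
      intro k
      rw [filter_map_eq_col k cs, ← col_filter k (cs.map String.toList)]
    exact congrArg (fun f => List.flatMap f (List.range m.toNat)) (funext hfun)
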